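-- pv_equiv track=rewrite | github.com/eliottcassidy2000/math | 04-computation/independence_poly_special_values.py | build_conflict_adj_from_vsets
-- ===== SOURCE A (Python) =====
-- def build_conflict_adj_from_vsets(vsets):
--     """Build adjacency (as neighbor bitmasks) from list of frozensets."""
--     m = len(vsets)
--     nbr = [0] * m
--     for i in range(m):
--         for j in range(i + 1, m):
--             if vsets[i] & vsets[j]:
--                 nbr[i] |= 1 << j
--                 nbr[j] |= 1 << i
--     return nbr
-- ===== SOURCE B (Python) =====
-- def build_conflict_adj_from_vsets(vsets):
--     """Build adjacency (as neighbor bitmasks) from list of frozensets.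
--
--     Inverted index: one pass builds, per element, the bitmask of sets that
--     contain it; each set's neighbor mask is then the OR of the masks of its
--     elements with its own bit cleared.
--     """
--     masks = {}
--     for i, s in enumerate(vsets):
--         bit = 1 << i
--         for x in s:
--             masks[x] = masks.get(x, 0) | bit
--     nbr = []
--     for i, s in enumerate(vsets):
--         acc = 0
--         for x in s:
--             acc |= masks[x]
--         nbr.append(acc & ~(1 << i))
--     return nbr
-- ===== Notes on version B (the rewrite author's own statement) =====
-- stated objective: faster
-- what changed: Replaces A's O(m^2) all-pairs set-intersection scan with a one-pass inverted index mapping each element to the bitmask of sets containing it; each set's neighbor mask is then the OR of its elements' masks with the self bit cleared.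
import Mathlib
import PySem

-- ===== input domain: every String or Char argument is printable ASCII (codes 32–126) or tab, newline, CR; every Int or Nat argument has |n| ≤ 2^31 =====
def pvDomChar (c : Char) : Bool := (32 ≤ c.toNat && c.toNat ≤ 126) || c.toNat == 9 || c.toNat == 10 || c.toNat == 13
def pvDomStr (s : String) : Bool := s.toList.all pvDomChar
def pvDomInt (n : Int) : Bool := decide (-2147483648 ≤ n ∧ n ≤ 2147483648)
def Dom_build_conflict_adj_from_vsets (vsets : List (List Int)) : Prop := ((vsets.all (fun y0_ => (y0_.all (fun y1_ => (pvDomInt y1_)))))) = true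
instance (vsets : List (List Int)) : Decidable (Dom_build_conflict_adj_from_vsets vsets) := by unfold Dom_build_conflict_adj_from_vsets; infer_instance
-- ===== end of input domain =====

-- B replaces A's O(m^2) pairwise intersection scan with an inverted index (element -> bitmask
-- of sets containing it) built in one pass; each set's neighbor mask is the OR of its elements'
-- masks with the self bit cleared: objective faster (asymptotic).


-- ===== PORT A =====
-- truthiness of `vsets[i] & vsets[j]` (nonempty intersection); exact for Python sets
def pvInter (s t : List Int) : Bool := s.any (fun x => t.contains x)

-- body of A's inner loop (`nbr[i] |= 1 << j; nbr[j] |= 1 << i`); `1 << k` ported as 2^k (exact)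
def pvPairUpd (vsets : List (List Int)) (nbr : List Int) (i j : Nat) : List Int :=
  if pvInter (vsets.getD i []) (vsets.getD j []) then
    let nbr1 := nbr.set i (Int.lor (nbr.getD i 0) ((2:Int)^j))
    nbr1.set j (Int.lor (nbr1.getD j 0) ((2:Int)^i))
  else nbr

def build_conflict_adj_from_vsets (vsets : List (List Int)) : List Int :=
  let m := vsets.length
  (List.range m).foldl
    (fun nbr i => (List.range' (i+1) (m - (i+1))).foldl (fun nbr j => pvPairUpd vsets nbr i j) nbr)
    (List.replicate m (0:Int))

-- ===== PORT B =====
-- Source B's dict `masks`: element -> bitmask of the indices of the sets containing it;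
-- `1 << i` ported as 2^i (exact); the enumerate index p.1 is ≥ 0, so .toNat is exact
def pvMasks (vsets : List (List Int)) : PySem.Dict Int Int :=
  (PySem.List.enumerate vsets).foldl
    (fun d p => p.2.foldl (fun d x => d.insert x (Int.lor (d.getD x 0) ((2:Int)^(p.1.toNat)))) d)
    PySem.Dict.empty

-- Source B's `masks[x]` is ported as getD x 0: exact, since the key is always present (x ∈ vsets[i])
def build_conflict_adj_from_vsets_alt (vsets : List (List Int)) : List Int :=
  let masks := pvMasks vsets
  (PySem.List.enumerate vsets).foldl
    (fun nbr p =>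
      nbr ++ [Int.land (p.2.foldl (fun acc x => Int.lor acc (masks.getD x 0)) 0)
                       (Int.lnot ((2:Int)^(p.1.toNat)))])
    []

-- ===== PRECONDITION & SPEC =====
def Spec_build_conflict_adj_from_vsets (vsets : List (List Int)) (out : List Int) : Prop := out = build_conflict_adj_from_vsets_alt vsets
instance (vsets : List (List Int)) (out : List Int) : Decidable (Spec_build_conflict_adj_from_vsets vsets out) := by unfold Spec_build_conflict_adj_from_vsets; infer_instance

-- ===== CLAIM (what is proved, stated in full; the proofs are below) =====
def Claim_equal_build_conflict_adj_from_vsets : Prop := ∀ (vsets : List (List Int)), Dom_build_conflict_adj_from_vsets vsets → Spec_build_conflict_adj_from_vsets vsets (build_conflict_adj_from_vsets vsets)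

-- ===== LEMMAS AND PROOFS =====

-- cast bridges between Int bit operations on nonneg operands and Nat bit operations
theorem intCast_lor (a b : Nat) : Int.lor (a : Int) (b : Int) = ((a ||| b : Nat) : Int) := rfl

theorem intCast_pow2 (b : Nat) : ((2:Int)^b) = ((2^b : Nat) : Int) := by push_cast; ring

theorem intCast_land_lnot (a b : Nat) :
    Int.land (a : Int) (Int.lnot (b : Int)) = ((Nat.ldiff a b : Nat) : Int) := by
  cases a <;> cases b <;> rfl

theorem nat_lor_lor_self (a b : Nat) : (a ||| b) ||| b = a ||| b := by
  apply Nat.eq_of_testBit_eq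
  intro t
  simp [Nat.testBit_lor, Bool.or_assoc, Bool.or_self]

theorem nat_zero_lor (a : Nat) : (0 : Nat) ||| a = a := by
  apply Nat.eq_of_testBit_eq
  intro t
  simp

theorem nat_lor_zero (a : Nat) : a ||| (0 : Nat) = a := by
  apply Nat.eq_of_testBit_eq
  intro t
  simp

-- bitmask of a list of positions
def encB (l : List Nat) : Nat := l.foldr (fun j a => 2^j ||| a) 0

theorem testBit_encB (l : List Nat) (t : Nat) : (encB l).testBit t = decide (t ∈ l) := by
  induction l with
  | nil => simp [encB]
  | cons j l ih =>
    simp only [encB, List.foldr_cons, Nat.testBit_lor] at *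
    rw [ih]
    by_cases h : t = j
    · simp [h]
    · simp [h, Nat.testBit_two_pow, Ne.symm h]

-- the canonical neighbor mask of set k: bits at the indices t ≠ k whose set meets set k
def adjMask (vsets : List (List Int)) (k : Nat) : Nat :=
  encB ((List.range vsets.length).filter
    (fun j => decide (j ≠ k) && pvInter (vsets.getD k []) (vsets.getD j [])))

theorem testBit_adjMask (vsets : List (List Int)) (k t : Nat) :
    (adjMask vsets k).testBit t
      = (decide (t < vsets.length) && decide (t ≠ k) && pvInter (vsets.getD k []) (vsets.getD t [])) := by
  rw [adjMask, testBit_encB]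
  by_cases hm : t < vsets.length <;>
    by_cases hk : t = k <;>
      simp [List.mem_filter, hm, hk, List.mem_range]

theorem pvInter_comm (a b : List Int) : pvInter a b = pvInter b a := by
  rw [Bool.eq_iff_iff]
  simp only [pvInter, List.any_eq_true, List.contains_iff_mem]
  constructor <;> rintro ⟨x, h1, h2⟩ <;> exact ⟨x, h2, h1⟩

-- ---- A-side characterization ----

-- mask-level mirror of pvPairUpd
def updM (vsets : List (List Int)) (M : Nat → Nat) (i j : Nat) : Nat → Nat :=
  fun k => if pvInter (vsets.getD i []) (vsets.getD j []) then
    (if k = i then M i ||| 2^j else if k = j then M j ||| 2^i else M k)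
  else M k

-- the abstract state of A's nbr array
def St (m : Nat) (M : Nat → Nat) : List Int := (List.range m).map (fun k => ((M k : Nat) : Int))

theorem getD_St (m : Nat) (M : Nat → Nat) (k : Nat) (hk : k < m) :
    (St m M).getD k 0 = ((M k : Nat) : Int) := by
  rw [St, List.getD_eq_getElem?_getD]
  simp [hk]

theorem set_St (m : Nat) (M : Nat → Nat) (i : Nat) (v : Nat) :
    (St m M).set i ((v : Nat) : Int) = St m (fun k => if k = i then v else M k) := by
  apply List.ext_getElem
  · simp [St]
  · intro n h1 h2
    simp only [St, List.getElem_set, List.getElem_map, List.getElem_range]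
    by_cases h : n = i
    · simp only [St, List.length_map, List.length_range] at h1
      simp [h]
    · simp [h, Ne.symm h]

theorem pairUpd_St (vsets : List (List Int)) (M : Nat → Nat) (i j : Nat)
    (hi : i < vsets.length) (hj : j < vsets.length) (hij : i ≠ j) :
    pvPairUpd vsets (St vsets.length M) i j = St vsets.length (updM vsets M i j) := by
  unfold pvPairUpd updM
  by_cases hI : pvInter (vsets.getD i []) (vsets.getD j []) = true
  · simp only [hI, if_true]
    rw [getD_St _ _ i hi, intCast_pow2, intCast_lor, set_St]
    rw [getD_St _ _ j hj, if_neg (Ne.symm hij), intCast_pow2, intCast_lor, set_St]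
    unfold St
    apply List.map_congr_left
    intro k _
    by_cases h1 : k = i
    · simp [h1, hij, Ne.symm hij]
    · by_cases h2 : k = j
      · simp only [h1, h2, if_false, if_pos rfl, if_true]
        rw [if_neg (Ne.symm hij)]
      · simp [h1, h2]
  · rw [Bool.not_eq_true] at hI
    simp only [hI, Bool.false_eq_true, if_false]

theorem inner_St (vsets : List (List Int)) (M : Nat → Nat) (i : Nat) (js : List Nat)
    (hi : i < vsets.length) (hjs : ∀ j ∈ js, j < vsets.length ∧ i ≠ j) :
    js.foldl (fun nbr j => pvPairUpd vsets nbr i j) (St vsets.length M)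
      = St vsets.length (js.foldl (fun M j => updM vsets M i j) M) := by
  induction js generalizing M with
  | nil => rfl
  | cons j js ih =>
    simp only [List.foldl_cons]
    rw [pairUpd_St vsets M i j hi (hjs j (List.mem_cons_self)).1 (hjs j (List.mem_cons_self)).2]
    exact ih _ (fun j' hj' => hjs j' (List.mem_cons_of_mem _ hj'))

theorem outer_St (vsets : List (List Int)) (M : Nat → Nat) (is : List Nat)
    (his : ∀ i ∈ is, i < vsets.length) :
    is.foldl (fun nbr i =>
        (List.range' (i+1) (vsets.length - (i+1))).foldl (fun nbr j => pvPairUpd vsets nbr i j) nbr)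
      (St vsets.length M)
      = St vsets.length (is.foldl (fun M i =>
          (List.range' (i+1) (vsets.length - (i+1))).foldl (fun M j => updM vsets M i j) M) M) := by
  induction is generalizing M with
  | nil => rfl
  | cons i is ih =>
    simp only [List.foldl_cons]
    rw [inner_St vsets M i _ (his i List.mem_cons_self)]
    · exact ih _ (fun i' hi' => his i' (List.mem_cons_of_mem _ hi'))
    · intro j hj
      rw [List.mem_range'_1] at hj
      have hi := his i List.mem_cons_self
      constructor <;> omega

-- testBit of the mask-level double fold, flattened to a pair list
theorem testBit_foldl_updM (vsets : List (List Int)) (P : List (Nat × Nat)) (M : Nat → Nat)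
    (k t : Nat) :
    ((P.foldl (fun M p => updM vsets M p.1 p.2) M) k).testBit t
      = ((M k).testBit t ||
          P.any (fun p => pvInter (vsets.getD p.1 []) (vsets.getD p.2 []) &&
            ((decide (k = p.1) && decide (p.2 = t)) || (decide (k = p.2) && decide (p.1 = t))))) := by
  induction P generalizing M with
  | nil => simp
  | cons p P ih =>
    simp only [List.foldl_cons, List.any_cons]
    rw [ih]
    have hstep : ((updM vsets M p.1 p.2) k).testBit t
        = ((M k).testBit t || (pvInter (vsets.getD p.1 []) (vsets.getD p.2 []) &&
            ((decide (k = p.1) && decide (p.2 = t)) || (decide (k = p.2) && decide (p.1 = t))))) := by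
      unfold updM
      cases hI : pvInter (vsets.getD p.1 []) (vsets.getD p.2 []) with
      | false =>
        simp only [hI, Bool.false_eq_true, if_false, Bool.false_and, Bool.or_false]
      | true =>
        simp only [hI, Bool.true_and]
        rw [if_pos trivial]
        by_cases h1 : k = p.1
        · subst h1
          rw [if_pos rfl, Nat.testBit_lor, Nat.testBit_two_pow, Bool.eq_iff_iff]
          simp only [Bool.or_eq_true, Bool.and_eq_true, decide_eq_true_eq]
          constructor
          · rintro (h | h)
            · exact Or.inl h
            · exact Or.inr (Or.inl ⟨trivial, h⟩)
          · rintro (h | ⟨_, h⟩ | ⟨hpq, hpt⟩)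
            · exact Or.inl h
            · exact Or.inr h
            · exact Or.inr (by rw [← hpq]; exact hpt)
        · by_cases h2 : k = p.2
          · subst h2
            rw [if_neg h1, if_pos rfl, Nat.testBit_lor, Nat.testBit_two_pow, Bool.eq_iff_iff]
            simp only [Bool.or_eq_true, Bool.and_eq_true, decide_eq_true_eq]
            constructor
            · rintro (h | h)
              · exact Or.inl h
              · exact Or.inr (Or.inr ⟨trivial, h⟩)
            · rintro (h | ⟨h3, _⟩ | ⟨_, h⟩)
              · exact Or.inl h
              · exact absurd h3 h1
              · exact Or.inr h
          · rw [if_neg h1, if_neg h2]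
            simp [h1, h2]
    rw [hstep, Bool.or_assoc]

theorem double_to_pairs (vsets : List (List Int)) (is : List Nat) (M : Nat → Nat) :
    is.foldl (fun M i =>
        (List.range' (i+1) (vsets.length - (i+1))).foldl (fun M j => updM vsets M i j) M) M
      = (is.flatMap (fun i => (List.range' (i+1) (vsets.length - (i+1))).map (fun j => (i, j)))).foldl
          (fun M p => updM vsets M p.1 p.2) M := by
  induction is generalizing M with
  | nil => rfl
  | cons i is ih =>
    simp only [List.foldl_cons, List.flatMap_cons, List.foldl_append, List.foldl_map]
    exact ih _

-- the pair list A processes: exactly the pairs (i, j) with i < j < m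
theorem mem_pairList (vsets : List (List Int)) (p : Nat × Nat) :
    p ∈ ((List.range vsets.length).flatMap
          (fun i => (List.range' (i+1) (vsets.length - (i+1))).map (fun j => (i, j))))
      ↔ p.1 < p.2 ∧ p.2 < vsets.length := by
  simp only [List.mem_flatMap, List.mem_map, List.mem_range, List.mem_range'_1]
  constructor
  · rintro ⟨i, hi, j, hj, rfl⟩
    simp only
    omega
  · rintro ⟨h1, h2⟩
    exact ⟨p.1, by omega, p.2, by omega, rfl⟩

theorem any_pairList (vsets : List (List Int)) (k t : Nat) (hk : k < vsets.length) :
    (((List.range vsets.length).flatMap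
        (fun i => (List.range' (i+1) (vsets.length - (i+1))).map (fun j => (i, j)))).any
      (fun p => pvInter (vsets.getD p.1 []) (vsets.getD p.2 []) &&
        ((decide (k = p.1) && decide (p.2 = t)) || (decide (k = p.2) && decide (p.1 = t)))))
      = (decide (t < vsets.length) && decide (t ≠ k) && pvInter (vsets.getD k []) (vsets.getD t [])) := by
  rw [Bool.eq_iff_iff]
  simp only [List.any_eq_true, Bool.and_eq_true, Bool.or_eq_true, decide_eq_true_eq]
  constructor
  · rintro ⟨p, hp, hI, (⟨h1, h2⟩ | ⟨h1, h2⟩)⟩ <;> rw [mem_pairList] at hp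
    · subst h1; subst h2
      exact ⟨⟨hp.2, by omega⟩, hI⟩
    · subst h1; subst h2
      exact ⟨⟨by omega, by omega⟩, by rw [pvInter_comm]; exact hI⟩
  · rintro ⟨⟨ht, htk⟩, hI⟩
    rcases Nat.lt_or_ge k t with h | h
    · exact ⟨(k, t), by rw [mem_pairList]; exact ⟨h, ht⟩, hI, Or.inl ⟨rfl, rfl⟩⟩
    · exact ⟨(t, k), by rw [mem_pairList]; exact ⟨by omega, hk⟩,
        by rw [pvInter_comm]; exact hI, Or.inr ⟨rfl, rfl⟩⟩

theorem A_char (vsets : List (List Int)) :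
    build_conflict_adj_from_vsets vsets = St vsets.length (adjMask vsets) := by
  unfold build_conflict_adj_from_vsets
  have h0 : List.replicate vsets.length (0:Int) = St vsets.length (fun _ => (0:Nat)) := by
    unfold St
    rw [show (fun (k : Nat) => (((0:Nat) : Nat) : Int)) = Function.const Nat ((0:Nat):Int) from by
        funext k; simp,
      List.map_const, List.length_range]
    norm_num
  simp only
  rw [h0, outer_St vsets _ _ (fun i hi => List.mem_range.mp hi)]
  unfold St
  apply List.map_congr_left
  intro k hk
  rw [List.mem_range] at hk
  congr 1
  apply Nat.eq_of_testBit_eq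
  intro t
  rw [double_to_pairs, testBit_foldl_updM, Nat.zero_testBit, Bool.false_or,
    any_pairList vsets k t hk, testBit_adjMask]

-- ---- B-side characterization ----

-- closed form of the inverted index: the mask of element x over vs, bits offset by s0
def pvMaskN (vs : List (List Int)) (s0 : Nat) (x : Int) : Nat :=
  match vs with
  | [] => 0
  | v :: vs => (if v.contains x then 2^s0 else 0) ||| pvMaskN vs (s0+1) x

theorem testBit_pvMaskN (vs : List (List Int)) (s0 : Nat) (x : Int) (t : Nat) :
    (pvMaskN vs s0 x).testBit t
      = (decide (s0 ≤ t) && decide (t - s0 < vs.length) && (vs.getD (t - s0) []).contains x) := by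
  induction vs generalizing s0 with
  | nil => simp [pvMaskN]
  | cons v vs ih =>
    simp only [pvMaskN, Nat.testBit_lor, ih]
    have hpow : ∀ s : Nat, ((if v.contains x = true then 2^s else 0 : Nat)).testBit t
        = (v.contains x && decide (s = t)) := by
      intro s
      cases hm : v.contains x
      · simp
      · simp [Nat.testBit_two_pow]
    rw [hpow]
    by_cases hst : t = s0
    · subst hst
      simp [show ¬ (t + 1 ≤ t) by omega, Nat.sub_self]
    · have e1 : decide (s0 = t) = false := by
        simp only [decide_eq_false_iff_not]
        exact fun h => hst h.symm
      by_cases hle : s0 ≤ t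
      · have harith : t - s0 = (t - (s0 + 1)) + 1 := by omega
        have e2 : decide (s0 + 1 ≤ t) = decide (s0 ≤ t) := by
          simp only [decide_eq_decide]; omega
        have e3 : decide (t - (s0 + 1) < vs.length) = decide (t - (s0 + 1) + 1 < (v :: vs).length) := by
          simp only [decide_eq_decide, List.length_cons]; omega
        rw [harith, List.getD_cons_succ, e1, Bool.and_false, Bool.false_or, e2, e3]
      · have e0 : decide (s0 ≤ t) = false := by
          simp only [decide_eq_false_iff_not]; omega
        have e2 : decide (s0 + 1 ≤ t) = false := by
          simp only [decide_eq_false_iff_not]; omega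
        rw [e1, e2, e0]
        simp

-- the inner insertion loop of pvMasks, abstractly
theorem innerFold_masks (v : List Int) (i : Nat) (d : PySem.Dict Int Int) (n : Int → Nat)
    (hd : ∀ y, d.getD y 0 = ((n y : Nat) : Int)) (y : Int) :
    (v.foldl (fun d x => d.insert x (Int.lor (d.getD x 0) ((2:Int)^i))) d).getD y 0
      = (((if v.contains y then n y ||| 2^i else n y) : Nat) : Int) := by
  induction v generalizing d n with
  | nil => simp [hd y]
  | cons x v ih =>
    simp only [List.foldl_cons]
    have hd' : ∀ z, (d.insert x (Int.lor (d.getD x 0) ((2:Int)^i))).getD z 0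
        = (((if z = x then n x ||| 2^i else n z : Nat)) : Int) := by
      intro z
      rw [PySem.Dict.getD_insert]
      by_cases hz : z = x
      · rw [if_pos hz, if_pos hz, hd x, intCast_pow2, intCast_lor]
      · rw [if_neg hz, if_neg hz, hd z]
    rw [ih _ _ hd']
    by_cases hyx : y = x
    · cases hyv : v.contains y with
      | false =>
        have hm : y ∉ v := by
          intro h
          rw [List.contains_iff_mem.mpr h] at hyv
          simp at hyv
        simp [List.contains_cons, hyx, hyv, hm]
      | true =>
        have hm : y ∈ v := List.contains_iff_mem.mp hyv
        simp [List.contains_cons, hyx, hyv, hm, nat_lor_lor_self]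
    · cases hyv : v.contains y with
      | false =>
        have hm : y ∉ v := by
          intro h
          rw [List.contains_iff_mem.mpr h] at hyv
          simp at hyv
        simp [List.contains_cons, hyx, hyv, hm]
      | true =>
        have hm : y ∈ v := List.contains_iff_mem.mp hyv
        simp [List.contains_cons, hyx, hyv, hm]

theorem maskFold (vs : List (List Int)) (s0 : Nat) (d : PySem.Dict Int Int) (n : Int → Nat)
    (hd : ∀ y, d.getD y 0 = ((n y : Nat) : Int)) (x : Int) :
    ((PySem.List.enumerate vs (s0 : Int)).foldl
        (fun d p => p.2.foldl (fun d x => d.insert x (Int.lor (d.getD x 0) ((2:Int)^(p.1.toNat)))) d)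
        d).getD x 0
      = (((n x ||| pvMaskN vs s0 x) : Nat) : Int) := by
  induction vs generalizing s0 d n with
  | nil =>
    rw [show pvMaskN [] s0 x = 0 from rfl, nat_lor_zero]
    exact hd x
  | cons v vs ih =>
    rw [PySem.List.enumerate_cons, List.foldl_cons]
    have hcast : ((s0 : Int) + 1) = (((s0 + 1 : Nat)) : Int) := by push_cast; ring
    rw [hcast]
    dsimp only
    simp only [Int.toNat_natCast]
    have hstep := innerFold_masks v ((s0 : Int)).toNat d n hd
    rw [Int.toNat_natCast] at hstep
    rw [ih (s0 + 1) _ (fun y => if v.contains y then n y ||| 2^s0 else n y) (fun y => hstep y)]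
    congr 1
    simp only [pvMaskN]
    by_cases hc : v.contains x = true
    · simp only [hc, if_true, Nat.lor_assoc]
    · rw [Bool.not_eq_true] at hc
      simp only [hc, Bool.false_eq_true, if_false]
      rw [nat_zero_lor]

theorem masks_getD (vsets : List (List Int)) (x : Int) :
    (pvMasks vsets).getD x 0 = ((pvMaskN vsets 0 x : Nat) : Int) := by
  unfold pvMasks
  have h := maskFold vsets 0 PySem.Dict.empty (fun _ => 0) (fun y => rfl) x
  simpa using h

-- fold of ++ [·] builds the map
theorem foldl_append_singleton {α β : Type} (l : List α) (init : List β) (f : α → β) :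
    l.foldl (fun acc p => acc ++ [f p]) init = init ++ l.map f := by
  induction l generalizing init with
  | nil => simp
  | cons x l ih => simp [ih]

-- the inner OR loop of B, pushed to Nat
theorem foldLor_masks (vsets : List (List Int)) (v : List Int) (a : Nat) :
    v.foldl (fun acc x => Int.lor acc ((pvMasks vsets).getD x 0)) ((a : Nat) : Int)
      = ((v.foldl (fun acc x => acc ||| pvMaskN vsets 0 x) a : Nat) : Int) := by
  induction v generalizing a with
  | nil => rfl
  | cons x v ih =>
    simp only [List.foldl_cons]
    rw [masks_getD, intCast_lor, ih]

theorem foldLor_masks0 (vsets : List (List Int)) (v : List Int) :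
    v.foldl (fun acc x => Int.lor acc ((pvMasks vsets).getD x 0)) (0 : Int)
      = ((v.foldl (fun acc x => acc ||| pvMaskN vsets 0 x) 0 : Nat) : Int) := by
  have h := foldLor_masks vsets v 0
  simpa using h

theorem testBit_foldLor (g : Int → Nat) (v : List Int) (a : Nat) (t : Nat) :
    (v.foldl (fun acc x => acc ||| g x) a).testBit t
      = (a.testBit t || v.any (fun x => (g x).testBit t)) := by
  induction v generalizing a with
  | nil => simp
  | cons x v ih =>
    simp only [List.foldl_cons, List.any_cons, ih, Nat.testBit_lor, Bool.or_assoc]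

theorem B_char (vsets : List (List Int)) :
    build_conflict_adj_from_vsets_alt vsets = St vsets.length (adjMask vsets) := by
  unfold build_conflict_adj_from_vsets_alt
  simp only
  rw [foldl_append_singleton, List.nil_append]
  apply List.ext_getElem
  · rw [List.length_map, PySem.List.length_enumerate, St, List.length_map, List.length_range]
  · intro k h1 h2
    rw [List.length_map, PySem.List.length_enumerate] at h1
    simp only [List.getElem_map, PySem.List.getElem_enumerate, St, List.getElem_range]
    rw [show ((0 : Int) + (k : Nat)) = ((k : Nat) : Int) by ring, Int.toNat_natCast]
    rw [foldLor_masks0, intCast_pow2, intCast_land_lnot]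
    congr 1
    apply Nat.eq_of_testBit_eq
    intro t
    rw [Nat.testBit_ldiff, testBit_foldLor, Nat.zero_testBit, Bool.false_or, testBit_adjMask]
    by_cases ht : t < vsets.length
    · have hgetk : vsets.getD k [] = vsets[k] := List.getD_eq_getElem vsets [] h1
      rw [Bool.eq_iff_iff]
      simp only [Bool.and_eq_true, Bool.not_eq_true', List.any_eq_true, decide_eq_true_eq,
        testBit_pvMaskN, Nat.testBit_two_pow, decide_eq_false_iff_not]
      constructor
      · rintro ⟨⟨x, hx, ⟨_, _⟩, hc⟩, hkt⟩
        refine ⟨⟨ht, fun h => hkt (by omega)⟩, ?_⟩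
        simp only [pvInter, List.any_eq_true, hgetk]
        exact ⟨x, hx, by simpa using hc⟩
      · rintro ⟨⟨_, htk⟩, hI⟩
        simp only [pvInter, List.any_eq_true, hgetk] at hI
        obtain ⟨x, hx, hc⟩ := hI
        exact ⟨⟨x, hx, ⟨by omega, by simpa using ht⟩, by simpa using hc⟩, fun h => htk (by omega)⟩
    · have h1' : (vsets[k].any fun x => (pvMaskN vsets 0 x).testBit t) = false := by
        rw [Bool.eq_false_iff]
        intro hany
        rw [List.any_eq_true] at hany
        obtain ⟨x, hx, hb⟩ := hany
        rw [testBit_pvMaskN] at hb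
        simp only [Bool.and_eq_true, decide_eq_true_eq] at hb
        omega
      rw [h1']
      simp [ht]

-- ===== VERDICT (by name: the statement is the Claim_ definition above) =====
theorem build_conflict_adj_from_vsets_spec : Claim_equal_build_conflict_adj_from_vsets := by
  intro vsets _
  unfold Spec_build_conflict_adj_from_vsets
  rw [A_char, B_char]
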